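-- pv_equiv track=rewrite | github.com/saajiidi/Inventory-Distribution-Manager | BackEnd/core/geo.py | extract_best_zone
-- ===== SOURCE A (Python) =====
-- KNOWN_ZONES = [
--     # --- Dhaka City & Periphery ---
--     "Adabor", "Agargaon", "Aftabnagar", "Badda", "Merul Badda", "Middle Badda",
--     "South Badda", "North Badda", "Bailey Road", "Banani", "Banglamotor",
--     "Bangshal", "Baridhara", "Baridhara DOHS", "Bashaboo", "Bashundhara",
--     "Bashundhara R/A", "Bawnia", "Berybidh", "Bimanbandar", "Bijoy Sarani",
--     "Bosila", "Cantonment", "Chakbazar", "Changkharpool", "Chawkbazar",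
--     "Dakshinkhan", "Darus Salam", "Demra", "Dhanmondi", "Dolaikhal",
--     "Doyaganj", "Elephant Road", "Eskaton", "Farmgate", "Fakirapool",
--     "Gandaria", "Gendaria", "Gabtoli", "Goran", "Green Road", "Gulistan",
--     "Gulshan", "Gulshan-1", "Gulshan-2", "Hazaribagh", "Hatirpool",
--     "Hatirjnill", "Ibrahimpur", "Islampur", "Jatrabari", "Jurain",
--     "Kadamtali", "Kafrul", "Kalabagan", "Kallyanpur", "Kamalapur",
--     "Kamarpara", "Kamrangirchar", "Kathalbagan", "Kawran Bazar", "Kazipara",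
--     "Keraniganj", "Khilgaon", "Khilkhet", "Kotwali", "Kuril", "Lalbagh",
--     "Lalmatia", "Malibagh", "Maniknagar", "Mandarina", "Munsiganj",
--     "Matuail", "Mirpur", "Mirpur DOHS", "Mirpur-1", "Mirpur-2", "Mirpur-10",
--     "Mirpur-11", "Mirpur-12", "Mirpur-14", "Moghbazar", "Mohakhali",
--     "Mohakhali DOHS", "Mohammadpur", "Mohammedpur", "Motijheel", "Mugda",
--     "Mugdapara", "Narayanganj", "Nawabganj", "New Eskaton", "New Market",
--     "Niketon", "Nikunja", "Nilkhet", "Pallabi", "Paltan", "Panthapath",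
--     "Paribagh", "Puran Dhaka", "Postogola", "Purana Paltan", "Raja Bazar",
--     "Rajarbagh", "Ramna", "Rampura", "Rayerbagh", "Rayer Bazar", "Rupnagar",
--     "Sabujbagh", "Sadarghat", "Sangsad Bhaban", "Satarkul", "Segunbagicha",
--     "Shah Ali", "Shahbag", "Shahjahanpur", "Shajahanpur", "Shampur",
--     "Shantinagar", "Sher-e-Bangla Nagar", "Shewrapara", "Shiddheswari",
--     "Shyampur", "Siddhesuree", "Sutrapur", "Tejgaon", "Tejgaon I/A",
--     "Tikatuli", "Tongi", "Turag", "Uttar Khan", "Uttara", "Vatara", "Wari",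
--     "Zigatola", "Savar", "Ashulia", "Dhamrai", "Hemayetpur", "EPZ",
--
--     # --- Chittagong (Chattogram) ---
--     "Agrabad", "Akbar Shah", "Anderkilla", "Bakalia", "Bandar", "Bayazid",
--     "Boalkhali", "Chandgaon", "Chawkbazar", "Chittagong Cantonment",
--     "Double Mooring", "EPZ", "Halishahar", "Hathazari", "Jamalkhan",
--     "Karnafuli", "Khulshi", "Kotwali", "Lalkhan Bazar", "Muradpur",
--     "Nasirabad", "New Market", "Oxygen", "Pahartali", "Panchlaish",
--     "Patenga", "Patiya", "Raozan", "Sadarghat", "Sitakunda", "WASA", "GEC",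
--
--     # --- Rajshahi ---
--     "Boalia", "Chandrima", "Katakhali", "Motiher", "Rajpara", "Shah Makhdum",
--     "Rajshahi Sadar", "Paba",
--
--     # --- Khulna ---
--     "Daulatpur", "Khalishpur", "Khan Jahan Ali", "Khulna Sadar", "Sonadanga",
--     "Boyra", "Gollamari",
--
--     # --- Sylhet ---
--     "Ambarkhana", "Airport", "Bandar Bazar", "Jalalabad", "Kotwali",
--     "Moglabazar", "Osmani Nagar", "Shah Paran", "South Surma", "Sylhet Sadar",
--     "Zindabazar", "Uposhahar",
--
--     # --- Barisal ---
--     "Agailjhara", "Babuganj", "Bakerganj", "Banaripara", "Barisal Sadar",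
--     "Gournadi", "Hizla", "Mehendiganj", "Muladi", "Wazirpur",
--
--     # --- Rangpur ---
--     "Badarganj", "Gangachara", "Kaunia", "Mithapukur", "Pirgacha", "Pirganj",
--     "Rangpur Sadar", "Taraganj",
--
--     # --- Mymensingh ---
--     "Bhaluka", "Dhobaura", "Fulbaria", "Gaffargaon", "Gauripur", "Haluaghat",
--     "Ishwarganj", "Mymensingh Sadar", "Muktagacha", "Nandail", "Phulpur",
--     "Trishal",
--
--     # --- Cumilla (Comilla) ---
--     "Barura", "Brahmanpara", "Burichang", "Chandina", "Chauddagram",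
--     "Cumilla Sadar", "Cumilla Sadar Dakshin", "Daudkandi", "Debidwar",
--     "Homna", "Laksam", "Lalmai", "Meghna", "Monohargonj", "Muradnagar",
--     "Nangalkot", "Titas", "Kandirpar", "Tomson Bridge", "Police Line",
--     "Race Course",
--
--     # --- Gazipur ---
--     "Gazipur Sadar", "Kaliakair", "Kaliganj", "Kapasia", "Sreepur", "Tongi",
--     "Board Bazar", "Chowrasta", "Joydebpur", "Konabari",
--
--     # --- Narayanganj ---
--     "Araihazar", "Bandar", "Narayanganj Sadar", "Rupganj", "Sonargaon",
--     "Siddhirganj", "Fatullah", "Chashara",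
--
--     # --- Bogura (Bogra) ---
--     "Adamdighi", "Bogura Sadar", "Dhunat", "Dhupchanchia", "Gabtali",
--     "Kahaloo", "Nandigram", "Sariakandi", "Sherpur", "Shibganj", "Sonatala",
--
--     # --- Generic Terms ---
--     "Kotwali", "Sadar", "Pourashava", "Municipality",
-- ]
--
-- def extract_best_zone(address, known_zones=None):
--     if known_zones is None:
--         known_zones = KNOWN_ZONES
--     if not isinstance(address, str) or not address:
--         return ""
--     addr_l = address.lower()
--     matches = [z for z in known_zones if z.lower() in addr_l]
--     if not matches:
--         return ""
--     matches.sort(key=len, reverse=True)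
--     return matches[0]
-- ===== SOURCE B (Python) =====
-- # B: single left-to-right pass keeping the current best match (strictly longer wins,
-- # ties keep the earlier zone), instead of A's build-list + stable sort + take head;
-- # the default zone table is stored as pipe-joined lines, split once at import.
-- _ZONE_LINES = [
--     "Adabor|Agargaon|Aftabnagar|Badda|Merul Badda|Middle Badda",
--     "South Badda|North Badda|Bailey Road|Banani|Banglamotor|Bangshal",
--     "Baridhara|Baridhara DOHS|Bashaboo|Bashundhara|Bashundhara R/A|Bawnia",
--     "Berybidh|Bimanbandar|Bijoy Sarani|Bosila|Cantonment|Chakbazar",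
--     "Changkharpool|Chawkbazar|Dakshinkhan|Darus Salam|Demra|Dhanmondi",
--     "Dolaikhal|Doyaganj|Elephant Road|Eskaton|Farmgate|Fakirapool",
--     "Gandaria|Gendaria|Gabtoli|Goran|Green Road|Gulistan",
--     "Gulshan|Gulshan-1|Gulshan-2|Hazaribagh|Hatirpool|Hatirjnill",
--     "Ibrahimpur|Islampur|Jatrabari|Jurain|Kadamtali|Kafrul",
--     "Kalabagan|Kallyanpur|Kamalapur|Kamarpara|Kamrangirchar|Kathalbagan",
--     "Kawran Bazar|Kazipara|Keraniganj|Khilgaon|Khilkhet|Kotwali",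
--     "Kuril|Lalbagh|Lalmatia|Malibagh|Maniknagar|Mandarina",
--     "Munsiganj|Matuail|Mirpur|Mirpur DOHS|Mirpur-1|Mirpur-2",
--     "Mirpur-10|Mirpur-11|Mirpur-12|Mirpur-14|Moghbazar|Mohakhali",
--     "Mohakhali DOHS|Mohammadpur|Mohammedpur|Motijheel|Mugda|Mugdapara",
--     "Narayanganj|Nawabganj|New Eskaton|New Market|Niketon|Nikunja",
--     "Nilkhet|Pallabi|Paltan|Panthapath|Paribagh|Puran Dhaka",
--     "Postogola|Purana Paltan|Raja Bazar|Rajarbagh|Ramna|Rampura",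
--     "Rayerbagh|Rayer Bazar|Rupnagar|Sabujbagh|Sadarghat|Sangsad Bhaban",
--     "Satarkul|Segunbagicha|Shah Ali|Shahbag|Shahjahanpur|Shajahanpur",
--     "Shampur|Shantinagar|Sher-e-Bangla Nagar|Shewrapara|Shiddheswari|Shyampur",
--     "Siddhesuree|Sutrapur|Tejgaon|Tejgaon I/A|Tikatuli|Tongi",
--     "Turag|Uttar Khan|Uttara|Vatara|Wari|Zigatola",
--     "Savar|Ashulia|Dhamrai|Hemayetpur|EPZ|Agrabad",
--     "Akbar Shah|Anderkilla|Bakalia|Bandar|Bayazid|Boalkhali",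
--     "Chandgaon|Chawkbazar|Chittagong Cantonment|Double Mooring|EPZ|Halishahar",
--     "Hathazari|Jamalkhan|Karnafuli|Khulshi|Kotwali|Lalkhan Bazar",
--     "Muradpur|Nasirabad|New Market|Oxygen|Pahartali|Panchlaish",
--     "Patenga|Patiya|Raozan|Sadarghat|Sitakunda|WASA",
--     "GEC|Boalia|Chandrima|Katakhali|Motiher|Rajpara",
--     "Shah Makhdum|Rajshahi Sadar|Paba|Daulatpur|Khalishpur|Khan Jahan Ali",
--     "Khulna Sadar|Sonadanga|Boyra|Gollamari|Ambarkhana|Airport",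
--     "Bandar Bazar|Jalalabad|Kotwali|Moglabazar|Osmani Nagar|Shah Paran",
--     "South Surma|Sylhet Sadar|Zindabazar|Uposhahar|Agailjhara|Babuganj",
--     "Bakerganj|Banaripara|Barisal Sadar|Gournadi|Hizla|Mehendiganj",
--     "Muladi|Wazirpur|Badarganj|Gangachara|Kaunia|Mithapukur",
--     "Pirgacha|Pirganj|Rangpur Sadar|Taraganj|Bhaluka|Dhobaura",
--     "Fulbaria|Gaffargaon|Gauripur|Haluaghat|Ishwarganj|Mymensingh Sadar",
--     "Muktagacha|Nandail|Phulpur|Trishal|Barura|Brahmanpara",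
--     "Burichang|Chandina|Chauddagram|Cumilla Sadar|Cumilla Sadar Dakshin|Daudkandi",
--     "Debidwar|Homna|Laksam|Lalmai|Meghna|Monohargonj",
--     "Muradnagar|Nangalkot|Titas|Kandirpar|Tomson Bridge|Police Line",
--     "Race Course|Gazipur Sadar|Kaliakair|Kaliganj|Kapasia|Sreepur",
--     "Tongi|Board Bazar|Chowrasta|Joydebpur|Konabari|Araihazar",
--     "Bandar|Narayanganj Sadar|Rupganj|Sonargaon|Siddhirganj|Fatullah",
--     "Chashara|Adamdighi|Bogura Sadar|Dhunat|Dhupchanchia|Gabtali",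
--     "Kahaloo|Nandigram|Sariakandi|Sherpur|Shibganj|Sonatala",
--     "Kotwali|Sadar|Pourashava|Municipality",
-- ]
--
-- KNOWN_ZONES = [z for line in _ZONE_LINES for z in line.split("|")]
--
--
-- def extract_best_zone(address, known_zones=None):
--     if known_zones is None:
--         known_zones = KNOWN_ZONES
--     if not isinstance(address, str):
--         return ""
--     addr_l = address.lower()
--     best = ""
--     for z in known_zones:
--         if len(z) > len(best) and z.lower() in addr_l:
--             best = z
--     return best
-- ===== Notes on version B (the rewrite author's own statement) =====
-- stated objective: faster
-- what changed: B replaces A's build-the-match-list-then-stable-sort-and-take-head with a single left-to-right fold keeping the current best zone (strictly longer wins, ties keep the earlier zone), skipping the lowercase/substring test for zones not longer than the current best; B also stores the default zone table as one joined string split once at load.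
import Mathlib
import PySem

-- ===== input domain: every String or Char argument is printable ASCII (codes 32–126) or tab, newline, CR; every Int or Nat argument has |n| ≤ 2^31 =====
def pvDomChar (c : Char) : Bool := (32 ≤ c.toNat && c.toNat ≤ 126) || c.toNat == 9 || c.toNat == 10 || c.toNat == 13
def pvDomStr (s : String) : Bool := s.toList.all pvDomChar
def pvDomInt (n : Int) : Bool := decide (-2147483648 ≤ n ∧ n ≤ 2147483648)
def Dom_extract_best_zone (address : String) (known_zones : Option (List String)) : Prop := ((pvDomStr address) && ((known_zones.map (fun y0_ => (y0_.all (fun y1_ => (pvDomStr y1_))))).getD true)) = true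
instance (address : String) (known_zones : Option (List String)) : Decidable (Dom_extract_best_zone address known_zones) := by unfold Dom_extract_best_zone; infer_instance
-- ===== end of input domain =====

-- B replaces the build-list / stable reverse sort / take-head of A by a single fold keeping the current
-- best match (strictly longer wins, ties keep the earlier zone; the substring test is skipped for zones
-- not longer than the current best); B also keeps its default zone table as one separator-joined string.

-- ===== PORT A =====
-- default value of the known_zones parameter (module constant KNOWN_ZONES of Source A)
def pvKnownZones : List String := [
  "Adabor", "Agargaon", "Aftabnagar", "Badda", "Merul Badda", "Middle Badda",
  "South Badda", "North Badda", "Bailey Road", "Banani", "Banglamotor", "Bangshal",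
  "Baridhara", "Baridhara DOHS", "Bashaboo", "Bashundhara", "Bashundhara R/A", "Bawnia",
  "Berybidh", "Bimanbandar", "Bijoy Sarani", "Bosila", "Cantonment", "Chakbazar",
  "Changkharpool", "Chawkbazar", "Dakshinkhan", "Darus Salam", "Demra", "Dhanmondi",
  "Dolaikhal", "Doyaganj", "Elephant Road", "Eskaton", "Farmgate", "Fakirapool",
  "Gandaria", "Gendaria", "Gabtoli", "Goran", "Green Road", "Gulistan",
  "Gulshan", "Gulshan-1", "Gulshan-2", "Hazaribagh", "Hatirpool", "Hatirjnill",
  "Ibrahimpur", "Islampur", "Jatrabari", "Jurain", "Kadamtali", "Kafrul",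
  "Kalabagan", "Kallyanpur", "Kamalapur", "Kamarpara", "Kamrangirchar", "Kathalbagan",
  "Kawran Bazar", "Kazipara", "Keraniganj", "Khilgaon", "Khilkhet", "Kotwali",
  "Kuril", "Lalbagh", "Lalmatia", "Malibagh", "Maniknagar", "Mandarina",
  "Munsiganj", "Matuail", "Mirpur", "Mirpur DOHS", "Mirpur-1", "Mirpur-2",
  "Mirpur-10", "Mirpur-11", "Mirpur-12", "Mirpur-14", "Moghbazar", "Mohakhali",
  "Mohakhali DOHS", "Mohammadpur", "Mohammedpur", "Motijheel", "Mugda", "Mugdapara",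
  "Narayanganj", "Nawabganj", "New Eskaton", "New Market", "Niketon", "Nikunja",
  "Nilkhet", "Pallabi", "Paltan", "Panthapath", "Paribagh", "Puran Dhaka",
  "Postogola", "Purana Paltan", "Raja Bazar", "Rajarbagh", "Ramna", "Rampura",
  "Rayerbagh", "Rayer Bazar", "Rupnagar", "Sabujbagh", "Sadarghat", "Sangsad Bhaban",
  "Satarkul", "Segunbagicha", "Shah Ali", "Shahbag", "Shahjahanpur", "Shajahanpur",
  "Shampur", "Shantinagar", "Sher-e-Bangla Nagar", "Shewrapara", "Shiddheswari", "Shyampur",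
  "Siddhesuree", "Sutrapur", "Tejgaon", "Tejgaon I/A", "Tikatuli", "Tongi",
  "Turag", "Uttar Khan", "Uttara", "Vatara", "Wari", "Zigatola",
  "Savar", "Ashulia", "Dhamrai", "Hemayetpur", "EPZ", "Agrabad",
  "Akbar Shah", "Anderkilla", "Bakalia", "Bandar", "Bayazid", "Boalkhali",
  "Chandgaon", "Chawkbazar", "Chittagong Cantonment", "Double Mooring", "EPZ", "Halishahar",
  "Hathazari", "Jamalkhan", "Karnafuli", "Khulshi", "Kotwali", "Lalkhan Bazar",
  "Muradpur", "Nasirabad", "New Market", "Oxygen", "Pahartali", "Panchlaish",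
  "Patenga", "Patiya", "Raozan", "Sadarghat", "Sitakunda", "WASA",
  "GEC", "Boalia", "Chandrima", "Katakhali", "Motiher", "Rajpara",
  "Shah Makhdum", "Rajshahi Sadar", "Paba", "Daulatpur", "Khalishpur", "Khan Jahan Ali",
  "Khulna Sadar", "Sonadanga", "Boyra", "Gollamari", "Ambarkhana", "Airport",
  "Bandar Bazar", "Jalalabad", "Kotwali", "Moglabazar", "Osmani Nagar", "Shah Paran",
  "South Surma", "Sylhet Sadar", "Zindabazar", "Uposhahar", "Agailjhara", "Babuganj",
  "Bakerganj", "Banaripara", "Barisal Sadar", "Gournadi", "Hizla", "Mehendiganj",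
  "Muladi", "Wazirpur", "Badarganj", "Gangachara", "Kaunia", "Mithapukur",
  "Pirgacha", "Pirganj", "Rangpur Sadar", "Taraganj", "Bhaluka", "Dhobaura",
  "Fulbaria", "Gaffargaon", "Gauripur", "Haluaghat", "Ishwarganj", "Mymensingh Sadar",
  "Muktagacha", "Nandail", "Phulpur", "Trishal", "Barura", "Brahmanpara",
  "Burichang", "Chandina", "Chauddagram", "Cumilla Sadar", "Cumilla Sadar Dakshin", "Daudkandi",
  "Debidwar", "Homna", "Laksam", "Lalmai", "Meghna", "Monohargonj",
  "Muradnagar", "Nangalkot", "Titas", "Kandirpar", "Tomson Bridge", "Police Line",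
  "Race Course", "Gazipur Sadar", "Kaliakair", "Kaliganj", "Kapasia", "Sreepur",
  "Tongi", "Board Bazar", "Chowrasta", "Joydebpur", "Konabari", "Araihazar",
  "Bandar", "Narayanganj Sadar", "Rupganj", "Sonargaon", "Siddhirganj", "Fatullah",
  "Chashara", "Adamdighi", "Bogura Sadar", "Dhunat", "Dhupchanchia", "Gabtali",
  "Kahaloo", "Nandigram", "Sariakandi", "Sherpur", "Shibganj", "Sonatala",
  "Kotwali", "Sadar", "Pourashava", "Municipality"]

def extract_best_zone (address : String) (known_zones : Option (List String)) : String :=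
  let zones := known_zones.getD pvKnownZones
  if address = "" then ""
  else
    let addr_l := PySem.Str.lower address
    let matched := zones.filter (fun z => PySem.Str.isIn (PySem.Str.lower z) addr_l)
    if matched = [] then ""
    else (PySem.List.sorted matched (fun z => PySem.Str.len z) true).headD ""

-- ===== PORT B =====
-- Source B's module constants: the zone table stored as pipe-joined lines, split and flattened at load
def pvZoneLines : List String := [
  "Adabor|Agargaon|Aftabnagar|Badda|Merul Badda|Middle Badda",
  "South Badda|North Badda|Bailey Road|Banani|Banglamotor|Bangshal",
  "Baridhara|Baridhara DOHS|Bashaboo|Bashundhara|Bashundhara R/A|Bawnia",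
  "Berybidh|Bimanbandar|Bijoy Sarani|Bosila|Cantonment|Chakbazar",
  "Changkharpool|Chawkbazar|Dakshinkhan|Darus Salam|Demra|Dhanmondi",
  "Dolaikhal|Doyaganj|Elephant Road|Eskaton|Farmgate|Fakirapool",
  "Gandaria|Gendaria|Gabtoli|Goran|Green Road|Gulistan",
  "Gulshan|Gulshan-1|Gulshan-2|Hazaribagh|Hatirpool|Hatirjnill",
  "Ibrahimpur|Islampur|Jatrabari|Jurain|Kadamtali|Kafrul",
  "Kalabagan|Kallyanpur|Kamalapur|Kamarpara|Kamrangirchar|Kathalbagan",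
  "Kawran Bazar|Kazipara|Keraniganj|Khilgaon|Khilkhet|Kotwali",
  "Kuril|Lalbagh|Lalmatia|Malibagh|Maniknagar|Mandarina",
  "Munsiganj|Matuail|Mirpur|Mirpur DOHS|Mirpur-1|Mirpur-2",
  "Mirpur-10|Mirpur-11|Mirpur-12|Mirpur-14|Moghbazar|Mohakhali",
  "Mohakhali DOHS|Mohammadpur|Mohammedpur|Motijheel|Mugda|Mugdapara",
  "Narayanganj|Nawabganj|New Eskaton|New Market|Niketon|Nikunja",
  "Nilkhet|Pallabi|Paltan|Panthapath|Paribagh|Puran Dhaka",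
  "Postogola|Purana Paltan|Raja Bazar|Rajarbagh|Ramna|Rampura",
  "Rayerbagh|Rayer Bazar|Rupnagar|Sabujbagh|Sadarghat|Sangsad Bhaban",
  "Satarkul|Segunbagicha|Shah Ali|Shahbag|Shahjahanpur|Shajahanpur",
  "Shampur|Shantinagar|Sher-e-Bangla Nagar|Shewrapara|Shiddheswari|Shyampur",
  "Siddhesuree|Sutrapur|Tejgaon|Tejgaon I/A|Tikatuli|Tongi",
  "Turag|Uttar Khan|Uttara|Vatara|Wari|Zigatola",
  "Savar|Ashulia|Dhamrai|Hemayetpur|EPZ|Agrabad",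
  "Akbar Shah|Anderkilla|Bakalia|Bandar|Bayazid|Boalkhali",
  "Chandgaon|Chawkbazar|Chittagong Cantonment|Double Mooring|EPZ|Halishahar",
  "Hathazari|Jamalkhan|Karnafuli|Khulshi|Kotwali|Lalkhan Bazar",
  "Muradpur|Nasirabad|New Market|Oxygen|Pahartali|Panchlaish",
  "Patenga|Patiya|Raozan|Sadarghat|Sitakunda|WASA",
  "GEC|Boalia|Chandrima|Katakhali|Motiher|Rajpara",
  "Shah Makhdum|Rajshahi Sadar|Paba|Daulatpur|Khalishpur|Khan Jahan Ali",
  "Khulna Sadar|Sonadanga|Boyra|Gollamari|Ambarkhana|Airport",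
  "Bandar Bazar|Jalalabad|Kotwali|Moglabazar|Osmani Nagar|Shah Paran",
  "South Surma|Sylhet Sadar|Zindabazar|Uposhahar|Agailjhara|Babuganj",
  "Bakerganj|Banaripara|Barisal Sadar|Gournadi|Hizla|Mehendiganj",
  "Muladi|Wazirpur|Badarganj|Gangachara|Kaunia|Mithapukur",
  "Pirgacha|Pirganj|Rangpur Sadar|Taraganj|Bhaluka|Dhobaura",
  "Fulbaria|Gaffargaon|Gauripur|Haluaghat|Ishwarganj|Mymensingh Sadar",
  "Muktagacha|Nandail|Phulpur|Trishal|Barura|Brahmanpara",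
  "Burichang|Chandina|Chauddagram|Cumilla Sadar|Cumilla Sadar Dakshin|Daudkandi",
  "Debidwar|Homna|Laksam|Lalmai|Meghna|Monohargonj",
  "Muradnagar|Nangalkot|Titas|Kandirpar|Tomson Bridge|Police Line",
  "Race Course|Gazipur Sadar|Kaliakair|Kaliganj|Kapasia|Sreepur",
  "Tongi|Board Bazar|Chowrasta|Joydebpur|Konabari|Araihazar",
  "Bandar|Narayanganj Sadar|Rupganj|Sonargaon|Siddhirganj|Fatullah",
  "Chashara|Adamdighi|Bogura Sadar|Dhunat|Dhupchanchia|Gabtali",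
  "Kahaloo|Nandigram|Sariakandi|Sherpur|Shibganj|Sonatala",
  "Kotwali|Sadar|Pourashava|Municipality"]

-- [z for line in _ZONE_LINES for z in line.split("|")]  (sep "|" is nonempty, so split? is some)
def pvKnownZonesB : List String := pvZoneLines.flatMap (fun line => (PySem.Str.split? line "|").getD [])

def extract_best_zone_alt (address : String) (known_zones : Option (List String)) : String :=
  let zones := known_zones.getD pvKnownZonesB
  let addr_l := PySem.Str.lower address
  zones.foldl (fun best z =>
    if PySem.Str.len best < PySem.Str.len z ∧ PySem.Str.isIn (PySem.Str.lower z) addr_l = true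
    then z else best) ""

-- ===== PRECONDITION & SPEC =====
def Spec_extract_best_zone (address : String) (known_zones : Option (List String)) (out : String) : Prop := out = extract_best_zone_alt address known_zones
instance (address : String) (known_zones : Option (List String)) (out : String) : Decidable (Spec_extract_best_zone address known_zones out) := by unfold Spec_extract_best_zone; infer_instance

-- ===== CLAIM (what is proved, stated in full; the proofs are below) =====
def Claim_equal_extract_best_zone : Prop := ∀ (address : String) (known_zones : Option (List String)), Dom_extract_best_zone address known_zones → Spec_extract_best_zone address known_zones (extract_best_zone address known_zones)

-- ===== LEMMAS AND PROOFS =====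

-- the two encodings of the default zone table denote the same list
set_option maxRecDepth 4000 in
set_option maxHeartbeats 2000000 in
theorem pv_zones_eq : pvKnownZonesB = pvKnownZones := by decide

-- a string of Python length 0 is the empty string
theorem pv_len_le_zero_iff (x : String) : PySem.Str.len x ≤ 0 ↔ x = "" := by
  rw [PySem.Str.len_eq]
  constructor
  · intro h
    have : x.toList.length = 0 := by omega
    have : x.toList = [] := List.length_eq_zero_iff.mp this
    cases x
    simp_all
  · intro h; subst h; simp

-- head (with default "") after one insertion step of the reverse insertion sort
theorem pv_headD_insertBy (x : String) (acc : List String) :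
    (PySem.List.insertBy (fun a b => decide (PySem.Str.len b < PySem.Str.len a)) x acc).headD ""
    = if PySem.Str.len (acc.headD "") < PySem.Str.len x then x else acc.headD "" := by
  cases acc with
  | nil =>
    by_cases hx : PySem.Str.len (([] : List String).headD "") < PySem.Str.len x
    · simp only [if_pos hx]
      simp [PySem.List.insertBy]
    · have h0 : PySem.Str.len (([] : List String).headD "") = 0 := by decide
      have : x = "" := (pv_len_le_zero_iff x).mp (by omega)
      subst this
      simp only [if_neg hx]
      simp [PySem.List.insertBy]
  | cons h t =>
    simp only [PySem.Str.len_eq, List.headD_cons]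
    simp [PySem.List.insertBy]
    split_ifs <;> rfl

-- head of the reverse insertion sort, computed as a running-maximum fold
theorem pv_headD_foldl_ins (m : List String) (acc : List String) :
    ((m.foldl (fun acc x =>
        PySem.List.insertBy (fun a b => decide (PySem.Str.len b < PySem.Str.len a)) x acc) acc).headD "")
    = m.foldl (fun b z => if PySem.Str.len b < PySem.Str.len z then z else b) (acc.headD "") := by
  induction m generalizing acc with
  | nil => rfl
  | cons x xs ih =>
    simp only [List.foldl_cons]
    rw [ih, pv_headD_insertBy]

-- the fold with the combined test is the plain running-maximum fold over the filtered list
theorem pv_foldl_filter (addr_l : String) (zs : List String) (b : String) :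
    zs.foldl (fun b z => if PySem.Str.len b < PySem.Str.len z ∧ PySem.Str.isIn (PySem.Str.lower z) addr_l = true then z else b) b
    = (zs.filter (fun z => PySem.Str.isIn (PySem.Str.lower z) addr_l)).foldl
        (fun b z => if PySem.Str.len b < PySem.Str.len z then z else b) b := by
  induction zs generalizing b with
  | nil => rfl
  | cons z zs ih =>
    simp only [List.foldl_cons, List.filter_cons]
    by_cases hp : PySem.Str.isIn (PySem.Str.lower z) addr_l = true
    · rw [if_pos hp]
      simp only [List.foldl_cons, hp, and_true]
      exact ih _
    · rw [if_neg (fun hAnd => hp hAnd.2), if_neg hp]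
      exact ih b

-- the core equivalence, for an arbitrary zone list and lowered address
theorem pv_main (zs : List String) (addr_l : String) :
    zs.foldl (fun b z => if PySem.Str.len b < PySem.Str.len z ∧ PySem.Str.isIn (PySem.Str.lower z) addr_l = true then z else b) ""
    = (if zs.filter (fun z => PySem.Str.isIn (PySem.Str.lower z) addr_l) = [] then ""
       else (PySem.List.sorted (zs.filter (fun z => PySem.Str.isIn (PySem.Str.lower z) addr_l))
               (fun z => PySem.Str.len z) true).headD "") := by
  rw [pv_foldl_filter, PySem.List.sorted_rev_eq_foldl_insertBy, pv_headD_foldl_ins]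
  by_cases h : zs.filter (fun z => PySem.Str.isIn (PySem.Str.lower z) addr_l) = []
  · rw [if_pos h, h]
    rfl
  · rw [if_neg h]
    rfl

-- ===== VERDICT (by name: the statement is the Claim_ definition above) =====
theorem extract_best_zone_spec : Claim_equal_extract_best_zone := by
  intro address known_zones _
  unfold Spec_extract_best_zone
  simp only [extract_best_zone, extract_best_zone_alt, pv_zones_eq]
  rw [pv_main (known_zones.getD pvKnownZones) (PySem.Str.lower address)]
  by_cases he : address = ""
  · subst he
    rw [if_pos rfl]
    by_cases hm : (known_zones.getD pvKnownZones).filter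
        (fun z => PySem.Str.isIn (PySem.Str.lower z) (PySem.Str.lower "")) = []
    · rw [if_pos hm]
    · rw [if_neg hm]
      have hall : ∀ z ∈ (known_zones.getD pvKnownZones).filter
          (fun z => PySem.Str.isIn (PySem.Str.lower z) (PySem.Str.lower "")), z = "" := by
        intro z hzm
        have hp := List.of_mem_filter hzm
        have hin := (PySem.Str.isIn_iff_infix _ _).mp hp
        have haddr : (PySem.Str.lower "").toList = [] := by decide
        rw [haddr] at hin
        have hnil : (PySem.Str.lower z).toList = [] := List.eq_nil_of_infix_nil hin
        have hlen : z.toList.length = 0 := by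
          have := congrArg List.length hnil
          simpa [PySem.Str.toList_lower, PySem.Chars.lower] using this
        have : z.toList = [] := List.length_eq_zero_iff.mp hlen
        cases z; simp_all
      cases hs : PySem.List.sorted ((known_zones.getD pvKnownZones).filter
          (fun z => PySem.Str.isIn (PySem.Str.lower z) (PySem.Str.lower "")))
          (fun z => PySem.Str.len z) true with
      | nil => rfl
      | cons y ys =>
        have hy : y ∈ (known_zones.getD pvKnownZones).filter
            (fun z => PySem.Str.isIn (PySem.Str.lower z) (PySem.Str.lower "")) := by
          have : y ∈ PySem.List.sorted ((known_zones.getD pvKnownZones).filter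
              (fun z => PySem.Str.isIn (PySem.Str.lower z) (PySem.Str.lower "")))
              (fun z => PySem.Str.len z) true := by rw [hs]; exact List.mem_cons_self
          exact (PySem.List.mem_sorted _ _ _ _).mp this
        exact (hall y hy).symm
  · rw [if_neg he]
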